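-- pv_equiv track=rewrite | github.com/rutakukharenko/stepik_python_generation_professional_course | 2.2_Часть_2.py | max_group_length
-- ===== SOURCE A (Python) =====
-- def max_group_length(n):
--     groups = {}
--
--     def sum_of_digits(num):
--         digit_sum = sum(int(digit) for digit in str(num))
--         return digit_sum
--
--     for num in range(1, n + 1):
--         digit_sum = sum_of_digits(num)
--
--         if digit_sum not in groups:
--             groups[digit_sum] = []
--
--         groups[digit_sum].append(num)
--
--     max_lenght = max([len(group) for group in groups.values()])
--
--     return max_lenght
-- ===== SOURCE B (Python) =====
-- def max_group_length(n):
--     # Digit DP: count how many numbers in 0..n have each digit sum, via a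
--     # base-10 recursion on n, then take the largest count.
--     W = 9 * len(str(n)) + 1          # strict upper bound for any digit sum of k <= n
--
--     def digit_sum(m):
--         s = 0
--         while m:
--             s += m % 10
--             m //= 10
--         return s
--
--     def counts(m):
--         # length-W table t with t[s] == |{k in 0..m : digit_sum(k) == s}|
--         if m < 10:
--             return [1] * (m + 1) + [0] * (W - m - 1)
--         q, r = divmod(m, 10)
--         sub = counts(q - 1)
--         # numbers 0 .. 10*q-1 are exactly 10*a+d with 0 <= a < q, 0 <= d <= 9
--         c = [sum(sub[t - d] for d in range(10) if t - d >= 0) for t in range(W)]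
--         # remaining numbers 10*q .. 10*q+r
--         dq = digit_sum(q)
--         for d in range(r + 1):
--             c[dq + d] += 1
--         return c
--
--     table = counts(n)
--     table[0] -= 1                    # drop the number 0 itself
--     return max(table)
-- ===== Notes on version B (the rewrite author's own statement) =====
-- stated objective: faster
-- what changed: B replaces A's per-number enumeration (string digit sum of every k in 1..n, dict-of-lists grouping, max of group lengths) by a digit-DP: a base-10 recursion on n builds a table counting how many numbers in 0..n have each digit sum, and the answer is the table maximum.
import Mathlib
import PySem

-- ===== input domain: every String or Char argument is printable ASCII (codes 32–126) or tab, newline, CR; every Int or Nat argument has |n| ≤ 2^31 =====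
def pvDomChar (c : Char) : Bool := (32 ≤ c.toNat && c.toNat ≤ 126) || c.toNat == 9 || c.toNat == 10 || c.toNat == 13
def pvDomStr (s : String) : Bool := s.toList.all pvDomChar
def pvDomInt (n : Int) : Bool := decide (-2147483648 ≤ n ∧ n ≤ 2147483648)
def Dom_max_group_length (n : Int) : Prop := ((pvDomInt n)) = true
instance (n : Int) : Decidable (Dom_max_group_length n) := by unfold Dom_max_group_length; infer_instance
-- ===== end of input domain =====

-- B replaces A's per-number enumeration of 1..n by a digit-DP recursion on n that counts,
-- per digit sum, the numbers 0..n with that digit sum, and takes the table maximum (faster in a timing run).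

-- ===== PORT A =====
-- int(digit) for one character of str(num); A only reaches this on decimal-digit characters
-- (num ≥ 1 inside the loop), where ofChars? is some, so .getD 0 is never the raising case.
def pyIntOfDigit (c : Char) : Int := (PySem.Int.ofChars? [c]).getD 0

-- sum(int(digit) for digit in str(num))
def sum_of_digits (num : Int) : Int :=
  ((PySem.Int.toChars num).map pyIntOfDigit).sum

-- one iteration of A's for-loop body
def groupsStep (groups : PySem.Dict Int (List Int)) (num : Int) : PySem.Dict Int (List Int) :=
  let digit_sum := sum_of_digits num
  let groups := if groups.contains digit_sum then groups else groups.insert digit_sum []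
  groups.modify digit_sum [] (fun g => g ++ [num])

def max_group_length (n : Int) : Int :=
  let groups := (PySem.List.pyRange 1 (n + 1) 1).foldl groupsStep PySem.Dict.empty
  -- max([...]) raises ValueError on an empty list; Pre_ (1 ≤ n) keeps the list nonempty,
  -- so .getD 0 is never the raising case
  (PySem.List.max? (groups.values.map (fun group => (group.length : Int))) (fun x => x)).getD 0

-- ===== PORT B =====
-- while m: s += m % 10; m //= 10   (B's digit_sum helper; B only runs it on m = q ≥ 0,
-- where Python's `while m:` truthiness guard coincides with the `m ≤ 0` stop written here)
def digSumLoop (s m : Int) : Int :=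
  if _h : m ≤ 0 then s
  else digSumLoop (s + PySem.Int.mod m 10) (PySem.Int.floordiv m 10)
  termination_by m.toNat
  decreasing_by
    rw [PySem.Int.floordiv_eq_ediv_of_pos (by omega)]
    omega

-- c[i] += v  (Python list index assignment; exact for 0 ≤ i < len c, the only indices B reaches)
def bump (c : List Int) (i : Int) (v : Int) : List Int :=
  if 0 ≤ i ∧ i.toNat < c.length then c.set i.toNat (c.getD i.toNat 0 + v) else c

-- counts(m): length-W table t with t[s] = |{k in 0..m : digit_sum(k) = s}|
def countsAux (W : Nat) (m : Int) : List Int :=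
  if _h : m < 10 then
    List.replicate (m + 1).toNat 1 ++ List.replicate ((W : Int) - m - 1).toNat 0
  else
    let q := PySem.Int.floordiv m 10
    let r := PySem.Int.mod m 10
    let sub := countsAux W (q - 1)
    -- [sum(sub[t - d] for d in range(10) if t - d >= 0) for t in range(W)]
    -- (sub[t - d] via getD: the index is nonnegative by the filter and < len(sub) since t < W)
    let c := (PySem.List.pyRange 0 (W : Int) 1).map (fun t =>
      (((PySem.List.pyRange 0 10 1).filter (fun d => decide (0 ≤ t - d))).map
        (fun d => sub.getD (t - d).toNat 0)).sum)
    let dq := digSumLoop 0 q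
    (PySem.List.pyRange 0 (r + 1) 1).foldl (fun c d => bump c (dq + d) 1) c
  termination_by m.toNat
  decreasing_by
    rw [PySem.Int.floordiv_eq_ediv_of_pos (by omega)]
    omega

def max_group_length_alt (n : Int) : Int :=
  let W := 9 * (PySem.Int.toChars n).length + 1   -- 9 * len(str(n)) + 1
  let table := countsAux W n
  let table := bump table 0 (-1)                  -- table[0] -= 1 (index 0 exists: len ≥ W ≥ 10)
  -- max(table) on a nonempty list never raises, so .getD 0 is never the raising case
  (PySem.List.max? table (fun x => x)).getD 0

-- ===== PRECONDITION & SPEC =====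
-- Pre_ excludes exactly n ≤ 0, where A's max over the empty dict of groups raises ValueError.
def Pre_max_group_length (n : Int) : Prop := 1 ≤ n
instance (n : Int) : Decidable (Pre_max_group_length n) := by unfold Pre_max_group_length; infer_instance
def pvWitness_max_group_length : Int := 5

def Spec_max_group_length (n : Int) (out : Int) : Prop := out = max_group_length_alt n
instance (n : Int) (out : Int) : Decidable (Spec_max_group_length n out) := by unfold Spec_max_group_length; infer_instance

-- ===== CLAIM (what is proved, stated in full; the proofs are below) =====
def Claim_equal_max_group_length : Prop := ∀ (n : Int), Dom_max_group_length n → Pre_max_group_length n → Spec_max_group_length n (max_group_length n)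

-- ===== LEMMAS AND PROOFS =====

-- digit sum of a natural number
def nds (m : Nat) : Int :=
  if _h : m = 0 then 0 else (m % 10 : Nat) + nds (m / 10)
  termination_by m
  decreasing_by omega

-- number of decimal digits
def numdig (m : Nat) : Nat :=
  if _h : m = 0 then 0 else numdig (m / 10) + 1
  termination_by m
  decreasing_by omega

-- ---- digit-sum arithmetic ----

lemma nds_nonneg (m : Nat) : 0 ≤ nds m := by
  induction m using Nat.strong_induction_on with
  | _ m ih =>
    rw [nds]
    by_cases h : m = 0
    · simp [h]
    · rw [dif_neg h]
      have := ih (m / 10) (by omega)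
      positivity

lemma nds_lt_ten {m : Nat} (h : m < 10) : nds m = m := by
  rw [nds]
  by_cases h0 : m = 0
  · simp [h0]
  · rw [dif_neg h0, Nat.mod_eq_of_lt h, Nat.div_eq_of_lt h, nds, dif_pos rfl, add_zero]

lemma nds_tenmul_add (a d : Nat) (hd : d < 10) : nds (10 * a + d) = nds a + d := by
  by_cases h0 : 10 * a + d = 0
  · have ha : a = 0 := by omega
    have hdz : d = 0 := by omega
    simp [ha, hdz]
  · rw [nds, dif_neg h0]
    have h1 : (10 * a + d) % 10 = d := by omega
    have h2 : (10 * a + d) / 10 = a := by omega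
    rw [h1, h2]
    ring

lemma numdig_succ (m : Nat) (h : m ≠ 0) : numdig m = numdig (m / 10) + 1 := by
  rw [numdig, dif_neg h]

lemma numdig_pos (m : Nat) (h : m ≠ 0) : 1 ≤ numdig m := by
  rw [numdig_succ m h]; omega

lemma numdig_mono (k t : Nat) (h : k ≤ t) : numdig k ≤ numdig t := by
  induction t using Nat.strong_induction_on generalizing k with
  | _ t ih =>
    by_cases hk : k = 0
    · subst hk
      rw [show numdig 0 = 0 from by rw [numdig]; simp]
      omega
    · have ht : t ≠ 0 := by omega
      rw [numdig_succ k hk, numdig_succ t ht]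
      have := ih (t / 10) (by omega) (k / 10) (Nat.div_le_div_right h)
      omega

lemma nds_le_numdig (m : Nat) : nds m ≤ 9 * numdig m := by
  induction m using Nat.strong_induction_on with
  | _ m ih =>
    by_cases h0 : m = 0
    · subst h0
      rw [show nds 0 = 0 from by rw [nds]; simp, show numdig 0 = 0 from by rw [numdig]; simp]
      simp
    · rw [nds, dif_neg h0, numdig_succ m h0]
      have h1 := ih (m / 10) (by omega)
      have h2 : m % 10 < 10 := by omega
      push_cast
      omega

-- ---- str(n) length ----

lemma len_toDigitsCore (fuel : Nat) : ∀ (m : Nat) (ds : List Char), m < fuel →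
    (Nat.toDigitsCore 10 fuel m ds).length = (if m = 0 then 1 else numdig m) + ds.length := by
  induction fuel with
  | zero => intro m ds h; omega
  | succ f ih =>
    intro m ds h
    rw [Nat.toDigitsCore]
    by_cases h0 : m / 10 = 0
    · rw [if_pos h0, List.length_cons]
      by_cases hm : m = 0
      · simp [hm]; omega
      · rw [if_neg hm, numdig_succ m hm, h0, show numdig 0 = 0 from by rw [numdig]; simp]
        omega
    · rw [if_neg h0, ih (m / 10) _ (by omega), if_neg h0, List.length_cons,
          numdig_succ m (by omega), if_neg (by omega : ¬ m = 0)]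
      omega

lemma toChars_len (n : Nat) (h : 1 ≤ n) : (PySem.Int.toChars (n : Int)).length = numdig n := by
  rw [show PySem.Int.toChars (n : Int) = Nat.toDigits 10 n by
    simp [PySem.Int.toChars, Int.toNat_natCast]]
  rw [Nat.toDigits, len_toDigitsCore (n + 1) n [] (by omega), if_neg (by omega : ¬ n = 0)]
  simp

-- ---- counting numbers below a bound with a given digit sum ----

def cntTo (m : Nat) (s : Int) : Nat := (List.range m).countP (fun k => decide (nds k = s))

lemma cntTo_neg (m : Nat) (s : Int) (hs : s < 0) : cntTo m s = 0 := by
  unfold cntTo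
  rw [List.countP_eq_zero]
  intro k _
  simp only [decide_eq_true_eq]
  intro hk
  have := nds_nonneg k
  omega

lemma sum_map_add {α : Type} (l : List α) (f g : α → Nat) :
    (l.map (fun x => f x + g x)).sum = (l.map f).sum + (l.map g).sum := by
  induction l with
  | nil => simp
  | cons x t ih => simp [ih]; omega

lemma countP_eq_sum_map {α : Type} (l : List α) (p : α → Bool) :
    l.countP p = (l.map (fun x => if p x then 1 else 0)).sum := by
  induction l with
  | nil => simp
  | cons x t ih =>
    rw [List.countP_cons, List.map_cons, List.sum_cons, ih]
    by_cases h : p x <;> simp [h] <;> omega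

lemma sum_map_intCast {α : Type} (l : List α) (f : α → Nat) :
    (l.map (fun x => (f x : Int))).sum = ((l.map f).sum : Int) := by
  induction l with
  | nil => simp
  | cons x t ih => simp [ih]

lemma cntId (m : Nat) (s : Int) :
    (List.range (m + 1)).countP (fun k : Nat => decide ((k : Int) = s)) = if 0 ≤ s ∧ s ≤ m then 1 else 0 := by
  induction m with
  | zero =>
    rw [show (0:Nat) + 1 = 1 from rfl, List.range_one, List.countP_cons, List.countP_nil]
    simp only [Nat.cast_zero]
    by_cases h : s = 0
    · subst h; simp
    · have hne : ¬ (0 ≤ s ∧ s ≤ 0) := fun hc => h (by omega)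
      rw [if_neg hne]
      simp [eq_comm, h]
  | succ m ih =>
    rw [List.range_succ, List.countP_append, ih, List.countP_cons, List.countP_nil]
    by_cases h1 : s = ((m + 1 : Nat) : Int)
    · subst h1
      have e1 : ¬ (0 ≤ ((m + 1 : Nat) : Int) ∧ ((m + 1 : Nat) : Int) ≤ (m : Int)) := by
        push_cast; omega
      have e2 : 0 ≤ ((m + 1 : Nat) : Int) ∧ ((m + 1 : Nat) : Int) ≤ ((m + 1 : Nat) : Int) := by
        push_cast; omega
      rw [if_neg e1, if_pos e2]
      simp
    · have hd : (decide (((m + 1 : Nat) : Int) = s)) = false := by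
        simp only [decide_eq_false_iff_not]
        exact fun hc => h1 hc.symm
      rw [hd]
      have hiff : (0 ≤ s ∧ s ≤ ((m + 1 : Nat) : Int)) ↔ (0 ≤ s ∧ s ≤ (m : Int)) := by
        push_cast at h1 ⊢
        omega
      rw [if_congr hiff rfl rfl]
      simp

lemma cntTo_base (m : Nat) (hm : m < 10) (s : Int) :
    cntTo (m + 1) s = if 0 ≤ s ∧ s ≤ m then 1 else 0 := by
  unfold cntTo
  rw [← cntId m s]
  apply List.countP_congr
  intro k hk
  rw [List.mem_range] at hk
  rw [nds_lt_ten (by omega)]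

lemma cnt_tenmul (q : Nat) (s : Int) :
    cntTo (10 * q) s = ((List.range 10).map (fun d : Nat => cntTo q (s - (d : Int)))).sum := by
  induction q with
  | zero =>
    simp [cntTo]
  | succ q ih =>
    have hsplit : (10 * (q + 1)) = 10 * q + 10 := by ring
    unfold cntTo at *
    rw [hsplit, List.range_add, List.countP_append, ih, List.countP_map]
    have hblock : (List.range 10).countP ((fun k => decide (nds k = s)) ∘ (fun d => 10 * q + d))
        = (List.range 10).countP (fun d : Nat => decide (nds q = s - (d : Int))) := by
      apply List.countP_congr
      intro d hd
      rw [List.mem_range] at hd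
      simp only [Function.comp_apply, decide_eq_true_eq]
      rw [nds_tenmul_add q d hd]
      omega
    rw [hblock]
    have hmap : (List.range 10).map (fun d : Nat => (List.range (q + 1)).countP (fun k => decide (nds k = s - (d : Int))))
        = (List.range 10).map (fun d : Nat => (List.range q).countP (fun k => decide (nds k = s - (d : Int))) + (if nds q = s - (d : Int) then 1 else 0)) := by
      apply List.map_congr_left
      intro d _
      rw [List.range_succ, List.countP_append, List.countP_cons, List.countP_nil]
      by_cases h : nds q = s - (d : Int) <;> simp [h]
    rw [hmap, sum_map_add, countP_eq_sum_map (List.range 10) (fun d : Nat => decide (nds q = s - (d : Int)))]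
    rw [show (List.range 10).map (fun x : Nat => if decide (nds q = s - (x : Int)) = true then 1 else 0)
        = (List.range 10).map (fun x : Nat => if nds q = s - (x : Int) then 1 else 0) from
      List.map_congr_left (fun d _ => by split_ifs with h1 h2 <;> simp_all)]

lemma cnt_split (m : Nat) (s : Int) :
    cntTo (m + 1) s
      = cntTo (10 * (m / 10)) s
        + (List.range (m % 10 + 1)).countP (fun d : Nat => decide (nds (m / 10) + (d : Int) = s)) := by
  unfold cntTo
  rw [show m + 1 = 10 * (m / 10) + (m % 10 + 1) by omega, List.range_add, List.countP_append,
      List.countP_map]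
  congr 1
  apply List.countP_congr
  intro d hd
  rw [List.mem_range] at hd
  simp only [Function.comp_apply, decide_eq_true_eq]
  rw [nds_tenmul_add (m / 10) d (by omega)]

-- ---- bump / table lemmas ----

lemma length_bump (c : List Int) (i v : Int) : (bump c i v).length = c.length := by
  unfold bump; split <;> simp

lemma getD_bump_in (c : List Int) (i v : Int) (hi : 0 ≤ i) (hlen : i.toNat < c.length) (t : Nat) :
    (bump c i v).getD t 0 = if (t : Int) = i then c.getD t 0 + v else c.getD t 0 := by
  unfold bump
  rw [if_pos ⟨hi, hlen⟩]
  by_cases h : t = i.toNat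
  · subst h
    rw [if_pos (by omega), List.getD_eq_getElem?_getD, List.getElem?_set_self hlen]
    rfl
  · rw [if_neg (by omega), List.getD_eq_getElem?_getD, List.getElem?_set_ne (fun hc => h hc.symm),
        ← List.getD_eq_getElem?_getD]

lemma foldl_bump (k : Nat) (dq : Int) (hdq : 0 ≤ dq) :
    ∀ (c : List Int), (∀ d : Nat, d < k → (dq + d).toNat < c.length) →
    ((PySem.List.pyRange 0 (k : Int) 1).foldl (fun c d => bump c (dq + d) 1) c).length = c.length ∧
    ∀ t : Nat, ((PySem.List.pyRange 0 (k : Int) 1).foldl (fun c d => bump c (dq + d) 1) c).getD t 0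
      = c.getD t 0 + ((List.range k).countP (fun d : Nat => decide (dq + d = (t : Int))) : Int) := by
  induction k with
  | zero =>
    intro c _
    rw [show ((0 : Nat) : Int) = 0 from rfl, PySem.List.pyRange_one_eq_nil (by omega)]
    simp
  | succ k ih =>
    intro c hc
    have hsplit : PySem.List.pyRange 0 ((k + 1 : Nat) : Int) 1
        = PySem.List.pyRange 0 (k : Int) 1 ++ [(k : Int)] := by
      rw [show ((k + 1 : Nat) : Int) = (k : Int) + 1 by push_cast; ring]
      exact PySem.List.pyRange_one_succ_right (by omega)
    obtain ⟨ihlen, ihget⟩ := ih c (fun d hd => hc d (by omega))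
    have hbound : (dq + (k : Int)).toNat < (((PySem.List.pyRange 0 (k : Int) 1).foldl
        (fun c d => bump c (dq + d) 1) c)).length := by
      rw [ihlen]; exact hc k (by omega)
    constructor
    · rw [hsplit, List.foldl_append, List.foldl_cons, List.foldl_nil, length_bump, ihlen]
    · intro t
      rw [hsplit, List.foldl_append, List.foldl_cons, List.foldl_nil,
          getD_bump_in _ _ _ (by omega) hbound t, ihget t, List.range_succ, List.countP_append,
          List.countP_cons, List.countP_nil]
      by_cases h : (t : Int) = dq + (k : Int)
      · rw [if_pos h]
        have hd : (decide (dq + (k : Int) = (t : Int))) = true := by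
          simp only [decide_eq_true_eq]; omega
        simp only [hd, if_true]
        push_cast
        omega
      · rw [if_neg h]
        have hd : (decide (dq + (k : Int) = (t : Int))) = false := by
          simp only [decide_eq_false_iff_not]; omega
        simp only [hd, Bool.false_eq_true, if_false]
        push_cast
        omega

lemma digSumLoop_eq_nds (m : Nat) : ∀ s : Int, digSumLoop s (m : Int) = s + nds m := by
  induction m using Nat.strong_induction_on with
  | _ m ih =>
    intro s
    rw [digSumLoop]
    by_cases hm : m = 0
    · subst hm; simp [nds]
    · rw [dif_neg (by omega)]
      rw [show (10:Int) = ((10:Nat):Int) from rfl, PySem.Int.mod_natCast, PySem.Int.floordiv_natCast]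
      rw [ih (m / 10) (by omega)]
      conv_rhs => rw [nds, dif_neg hm]
      ring

lemma filter_sum_eq (sub : List Int) (q W : Nat) (t : Nat) (ht : t < W)
    (hsub : ∀ j : Nat, j < W → sub.getD j 0 = (cntTo q (j : Int) : Int)) (k : Nat) :
    (((PySem.List.pyRange 0 (k : Int) 1).filter (fun d => decide (0 ≤ (t : Int) - d))).map
        (fun d => sub.getD ((t : Int) - d).toNat 0)).sum
      = ((List.range k).map (fun d : Nat => (cntTo q ((t : Int) - (d : Int)) : Int))).sum := by
  induction k with
  | zero =>
    rw [show ((0 : Nat) : Int) = 0 from rfl, PySem.List.pyRange_one_eq_nil (by omega)]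
    simp
  | succ k ih =>
    have hsplit : PySem.List.pyRange 0 ((k + 1 : Nat) : Int) 1
        = PySem.List.pyRange 0 (k : Int) 1 ++ [(k : Int)] := by
      rw [show ((k + 1 : Nat) : Int) = (k : Int) + 1 by push_cast; ring]
      exact PySem.List.pyRange_one_succ_right (by omega)
    rw [hsplit, List.filter_append, List.map_append, List.sum_append, ih, List.range_succ,
        List.map_append, List.sum_append]
    congr 1
    by_cases h : 0 ≤ (t : Int) - (k : Int)
    · rw [List.filter_cons, if_pos (by simpa using h), List.filter_nil, List.map_cons,
          List.map_nil, List.sum_cons, List.sum_nil, List.map_cons, List.map_nil,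
          List.sum_cons, List.sum_nil]
      have hj : ((t : Int) - (k : Int)).toNat < W := by omega
      rw [hsub _ hj, show ((((t : Int) - (k : Int)).toNat : Nat) : Int) = (t : Int) - (k : Int) by omega]
    · rw [List.filter_cons, if_neg (by simpa using h), List.filter_nil, List.map_nil,
          List.sum_nil, List.map_cons, List.map_nil, List.sum_cons, List.sum_nil,
          cntTo_neg q _ (by omega)]
      simp

lemma filter_sum_eq10 (sub : List Int) (q W : Nat) (t : Nat) (ht : t < W)
    (hsub : ∀ j : Nat, j < W → sub.getD j 0 = (cntTo q (j : Int) : Int)) :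
    (((PySem.List.pyRange 0 (10 : Int) 1).filter (fun d => decide (0 ≤ (t : Int) - d))).map
        (fun d => sub.getD ((t : Int) - d).toNat 0)).sum
      = ((List.range 10).map (fun d : Nat => (cntTo q ((t : Int) - (d : Int)) : Int))).sum := by
  have h := filter_sum_eq sub q W t ht hsub 10
  push_cast at h
  exact h

lemma countsAux_rec (W : Nat) (m : Int) (h : ¬ m < 10) :
    countsAux W m =
      (PySem.List.pyRange 0 ((PySem.Int.mod m 10) + 1) 1).foldl
        (fun c d => bump c (digSumLoop 0 (PySem.Int.floordiv m 10) + d) 1)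
        ((PySem.List.pyRange 0 (W : Int) 1).map (fun t =>
          (((PySem.List.pyRange 0 10 1).filter (fun d => decide (0 ≤ t - d))).map
            (fun d => (countsAux W (PySem.Int.floordiv m 10 - 1)).getD (t - d).toNat 0)).sum)) := by
  rw [countsAux, dif_neg h]

lemma countsAux_spec (mN : Nat) : ∀ (W : Nat), 10 ≤ W → 9 * numdig mN + 1 ≤ W →
    (countsAux W (mN : Int)).length = W ∧
    ∀ t : Nat, t < W → (countsAux W (mN : Int)).getD t 0 = (cntTo (mN + 1) (t : Int) : Int) := by
  induction mN using Nat.strong_induction_on with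
  | _ mN ih =>
    intro W hW10 hWd
    by_cases hsmall : mN < 10
    · rw [countsAux, dif_pos (by exact_mod_cast hsmall)]
      have e1 : ((mN : Int) + 1).toNat = mN + 1 := by omega
      have e2 : ((W : Int) - (mN : Int) - 1).toNat = W - mN - 1 := by omega
      rw [e1, e2]
      refine ⟨by rw [List.length_append, List.length_replicate, List.length_replicate]; omega, ?_⟩
      intro t ht
      rw [List.getD_eq_getElem?_getD, List.getElem?_append, List.length_replicate]
      by_cases htm : t < mN + 1
      · rw [if_pos htm, List.getElem?_replicate, if_pos htm, cntTo_base mN hsmall,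
            if_pos ⟨by positivity, by exact_mod_cast Nat.le_of_lt_succ htm⟩]
        rfl
      · rw [if_neg htm, List.getElem?_replicate, if_pos (by omega), cntTo_base mN hsmall,
            if_neg (by push_cast; omega)]
        rfl
    · rw [countsAux_rec W (mN : Int) (by exact_mod_cast hsmall)]
      have hq : PySem.Int.floordiv (mN : Int) 10 = ((mN / 10 : Nat) : Int) := by
        exact_mod_cast PySem.Int.floordiv_natCast mN 10
      have hr : PySem.Int.mod (mN : Int) 10 = ((mN % 10 : Nat) : Int) := by
        exact_mod_cast PySem.Int.mod_natCast mN 10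
      have hq1 : PySem.Int.floordiv (mN : Int) 10 - 1 = ((mN / 10 - 1 : Nat) : Int) := by
        rw [hq]; push_cast; omega
      have hnd1 : numdig mN = numdig (mN / 10) + 1 := numdig_succ mN (by omega)
      have hnd2 : numdig (mN / 10 - 1) ≤ numdig (mN / 10) := numdig_mono _ _ (by omega)
      obtain ⟨slen, sget⟩ := ih (mN / 10 - 1) (by omega) W hW10 (by omega)
      have hsubj : ∀ j : Nat, j < W →
          (countsAux W (PySem.Int.floordiv (mN : Int) 10 - 1)).getD j 0
            = (cntTo (mN / 10) (j : Int) : Int) := by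
        intro j hj
        rw [hq1, sget j hj, show mN / 10 - 1 + 1 = mN / 10 by omega]
      have hdq : digSumLoop 0 (PySem.Int.floordiv (mN : Int) 10) = nds (mN / 10) := by
        rw [hq, digSumLoop_eq_nds, zero_add]
      -- the comprehension list
      set c := (PySem.List.pyRange 0 (W : Int) 1).map (fun t =>
          (((PySem.List.pyRange 0 10 1).filter (fun d => decide (0 ≤ t - d))).map
            (fun d => (countsAux W (PySem.Int.floordiv (mN : Int) 10 - 1)).getD (t - d).toNat 0)).sum)
        with hcdef
      have hclen : c.length = W := by
        rw [hcdef, List.length_map, PySem.List.length_pyRange_one]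
        omega
      have hcget : ∀ t : Nat, t < W → c.getD t 0 = (cntTo (10 * (mN / 10)) (t : Int) : Int) := by
        intro t ht
        rw [hcdef, List.getD_eq_getElem?_getD,
            PySem.List.getElem?_map_pyRange_zero _ W t ht]
        show (((PySem.List.pyRange 0 10 1).filter (fun d => decide (0 ≤ (t : Int) - d))).map
            (fun d => (countsAux W (PySem.Int.floordiv (mN : Int) 10 - 1)).getD ((t : Int) - d).toNat 0)).sum = _
        rw [filter_sum_eq10 _ (mN / 10) W t ht hsubj, cnt_tenmul (mN / 10) (t : Int)]
        rw [show ((List.range 10).map (fun d : Nat => (cntTo (mN / 10) ((t : Int) - (d : Int)) : Int)))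
            = ((List.range 10).map (fun d : Nat => ((fun d' : Nat => cntTo (mN / 10) ((t : Int) - (d' : Int))) d : Int))) from rfl,
            sum_map_intCast]
      have hmodsucc : PySem.Int.mod (mN : Int) 10 + 1 = ((mN % 10 + 1 : Nat) : Int) := by
        rw [hr]; push_cast; ring
      have hbound : ∀ d : Nat, d < mN % 10 + 1 → (nds (mN / 10) + (d : Int)).toNat < c.length := by
        intro d hd
        have h1 := nds_le_numdig (mN / 10)
        have h2 := nds_nonneg (mN / 10)
        rw [hclen]
        omega
      obtain ⟨flen, fget⟩ := foldl_bump (mN % 10 + 1) (nds (mN / 10)) (nds_nonneg _) c hbound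
      rw [hmodsucc, hdq]
      refine ⟨by rw [flen, hclen], ?_⟩
      intro t ht
      rw [fget t, hcget t ht]
      have hsplit := cnt_split mN (t : Int)
      push_cast
      omega

-- ---- A's fold characterized ----

lemma groupsStep_eq_modify (g : PySem.Dict Int (List Int)) (num : Int) :
    groupsStep g num = g.modify (sum_of_digits num) [] (fun v => v ++ [num]) := by
  unfold groupsStep PySem.Dict.modify
  by_cases hc : g.contains (sum_of_digits num)
  · simp [hc]
  · simp only [hc, Bool.false_eq_true, if_false]
    rw [PySem.Dict.getD_insert_self, PySem.Dict.insert_insert_self,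
        PySem.Dict.getD_of_not_contains _ _ (by simpa using hc)]

lemma pyIntOfDigit_digitChar (k : Nat) (hk : k < 10) :
    pyIntOfDigit (Nat.digitChar k) = (k : Int) := by
  interval_cases k <;> decide

lemma sum_toDigitsCore (fuel : Nat) : ∀ (m : Nat) (ds : List Char), m < fuel →
    ((Nat.toDigitsCore 10 fuel m ds).map pyIntOfDigit).sum
      = nds m + ((ds.map pyIntOfDigit).sum) := by
  induction fuel with
  | zero => intro m ds h; omega
  | succ f ih =>
    intro m ds h
    rw [Nat.toDigitsCore]
    by_cases h0 : m / 10 = 0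
    · simp only [h0, if_true]
      rw [List.map_cons, List.sum_cons, pyIntOfDigit_digitChar _ (Nat.mod_lt _ (by omega))]
      conv_rhs => rw [nds]
      by_cases hm : m = 0
      · simp [hm]
      · rw [dif_neg hm, h0, nds, dif_pos rfl]
        push_cast
        ring
    · rw [if_neg h0]
      rw [ih (m / 10) _ (by omega)]
      rw [List.map_cons, List.sum_cons, pyIntOfDigit_digitChar _ (Nat.mod_lt _ (by omega))]
      conv_rhs => rw [nds, dif_neg (by omega : ¬ m = 0)]
      push_cast
      ring

lemma sum_of_digits_eq_nds (m : Nat) : sum_of_digits (m : Int) = nds m := by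
  unfold sum_of_digits
  rw [show PySem.Int.toChars (m : Int) = Nat.toDigits 10 m by
    simp [PySem.Int.toChars, Int.toNat_natCast]]
  rw [Nat.toDigits]
  rw [sum_toDigitsCore (m + 1) m [] (by omega)]
  simp

lemma filterA_len (nN : Nat) (s : Int) :
    ((PySem.List.pyRange 1 ((nN : Int) + 1) 1).filter (fun x => sum_of_digits x == s)).length
      = (List.range nN).countP (fun k => decide (nds (k + 1) = s)) := by
  rw [show (nN : Int) + 1 = 1 + (nN : Int) by ring, PySem.List.pyRange_one, List.filter_map,
      List.length_map, show ((1 : Int) + (nN : Int) - 1).toNat = nN by omega,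
      ← List.countP_eq_length_filter]
  apply List.countP_congr
  intro k hk
  rw [List.mem_range] at hk
  simp only [Function.comp_apply]
  rw [show (1 : Int) + (k : Int) = ((k + 1 : Nat) : Int) by push_cast; ring, sum_of_digits_eq_nds]
  by_cases h : nds (k + 1) = s <;> simp [h]

lemma cntTo_shift (nN : Nat) (t : Int) :
    (cntTo (nN + 1) t : Int) - (if t = 0 then 1 else 0)
      = ((List.range nN).countP (fun k => decide (nds (k + 1) = t)) : Int) := by
  unfold cntTo
  rw [List.range_succ_eq_map, List.countP_cons, List.countP_map]
  have hc : (List.range nN).countP ((fun k => decide (nds k = t)) ∘ Nat.succ)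
      = (List.range nN).countP (fun k => decide (nds (k + 1) = t)) := rfl
  rw [hc, show nds 0 = 0 from by rw [nds]; simp]
  by_cases h : t = 0
  · subst h; simp
  · have : (decide ((0 : Int) = t)) = false := by simp [Ne.symm h]
    rw [this, if_neg h]
    push_cast
    omega

lemma final_eq (n : Int) (h : 1 ≤ n) : max_group_length n = max_group_length_alt n := by
  obtain ⟨nN, rfl⟩ : ∃ nN : Nat, n = (nN : Int) := ⟨n.toNat, by omega⟩
  have hnN : 1 ≤ nN := by omega
  -- abbreviations
  set l := PySem.List.pyRange 1 ((nN : Int) + 1) 1 with hldef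
  set W := 9 * (PySem.Int.toChars (nN : Int)).length + 1 with hWdef
  have hW : W = 9 * numdig nN + 1 := by rw [hWdef, toChars_len nN hnN]
  have hW10 : 10 ≤ W := by
    have := numdig_pos nN (by omega)
    omega
  -- ---- A's dict ----
  have hstep : groupsStep = fun g x => g.modify (sum_of_digits x) [] (fun v => v ++ [x]) :=
    funext fun g => funext fun x => groupsStep_eq_modify g x
  set R := l.foldl groupsStep PySem.Dict.empty with hRdef
  have hnodup : R.keys.Nodup := by
    rw [hRdef, hstep]
    exact PySem.Dict.nodup_keys_foldl_modify_key l sum_of_digits []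
      (fun d x v => v ++ [x]) PySem.Dict.empty PySem.Dict.nodup_keys_empty
  have hkeys : R.keys = PySem.Set.ofList (l.map sum_of_digits) := by
    rw [hRdef, hstep]
    exact PySem.Dict.keys_foldl_modify_key l sum_of_digits []
      (fun d x v => v ++ [x]) PySem.Dict.empty
  have hgetD : ∀ s : Int, R.getD s [] = l.filter (fun x => sum_of_digits x == s) := by
    intro s
    rw [hRdef, hstep, show l.foldl (fun g x => g.modify (sum_of_digits x) [] (fun v => v ++ [x])) PySem.Dict.empty
        = (l.map (fun x => (sum_of_digits x, x))).foldl (fun d p => d.modify p.1 [] (fun v => v ++ [p.2])) PySem.Dict.empty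
        from by rw [List.foldl_map],
      PySem.Dict.getD_foldl_modify_append, PySem.Dict.getD_empty, List.filter_map, List.map_map]
    simp only [List.nil_append]
    rw [show ((fun p : Int × Int => p.2) ∘ fun x : Int => (sum_of_digits x, x)) = id from rfl, List.map_id]
    rfl
  have hvals : R.values = R.keys.map (fun s => R.getD s []) :=
    PySem.Dict.values_eq_map_keys R hnodup []
  -- per-digit-sum count over 1..n
  set cnt2 : Int → Nat := fun s => (List.range nN).countP (fun k => decide (nds (k + 1) = s)) with hcnt2
  have hlen2 : ∀ s : Int, (R.getD s []).length = cnt2 s := by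
    intro s
    rw [hgetD s, hldef, filterA_len nN s]
  -- bounds for digit sums occurring in 1..n
  have hmemBound : ∀ s : Int, s ∈ l.map sum_of_digits → 0 ≤ s ∧ s.toNat < W ∧ ((s.toNat : Nat) : Int) = s := by
    intro s hs
    obtain ⟨x, hx, rfl⟩ := List.mem_map.mp hs
    rw [hldef, PySem.List.mem_pyRange_one] at hx
    obtain ⟨xN, rfl⟩ : ∃ xN : Nat, x = (xN : Int) := ⟨x.toNat, by omega⟩
    rw [sum_of_digits_eq_nds]
    have h1 := nds_nonneg xN
    have h2 := nds_le_numdig xN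
    have h3 := numdig_mono xN nN (by omega)
    refine ⟨h1, by omega, by omega⟩
  have hcntMem : ∀ j : Nat, cnt2 (j : Int) ≠ 0 → (j : Int) ∈ l.map sum_of_digits := by
    intro j hj
    rw [hcnt2] at hj
    have : ¬ (∀ k ∈ List.range nN, ¬ (fun k => decide (nds (k + 1) = (j : Int))) k) := by
      intro hall
      exact hj (List.countP_eq_zero.mpr hall)
    push_neg at this
    obtain ⟨k, hk, hpk⟩ := this
    rw [List.mem_range] at hk
    have hkl : ((k + 1 : Nat) : Int) ∈ l := by
      rw [hldef, PySem.List.mem_pyRange_one]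
      push_cast
      omega
    refine List.mem_map.mpr ⟨((k + 1 : Nat) : Int), hkl, ?_⟩
    rw [sum_of_digits_eq_nds]
    simpa using hpk
  -- ---- B's table ----
  obtain ⟨tlen, tget⟩ := countsAux_spec nN W hW10 (by omega)
  set tableF := bump (countsAux W (nN : Int)) 0 (-1) with htF
  have htFlen : tableF.length = W := by rw [htF, length_bump, tlen]
  have htFget : ∀ t : Nat, t < W → tableF.getD t 0 = (cnt2 (t : Int) : Int) := by
    intro t ht
    have hshift := cntTo_shift nN (t : Int)
    have hc2 : ((cnt2 (t : Int) : Nat) : Int)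
        = (((List.range nN).countP (fun k => decide (nds (k + 1) = (t : Int))) : Nat) : Int) := by
      rw [hcnt2]
    rw [htF, getD_bump_in _ 0 (-1) (by omega) (by rw [tlen]; omega) t, hc2]
    by_cases h0 : t = 0
    · subst h0
      rw [if_pos (by norm_num), tget 0 (by omega)]
      rw [if_pos (by norm_num)] at hshift
      omega
    · rw [if_neg (by exact_mod_cast h0), tget t ht]
      rw [if_neg (by exact_mod_cast h0)] at hshift
      omega
  -- ---- the two maxima ----
  set LA := R.values.map (fun g : List Int => (g.length : Int)) with hLA
  have hLAne : LA ≠ [] := by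
    have h1 : (1 : Int) ∈ l := by
      rw [hldef, PySem.List.mem_pyRange_one]
      omega
    have h2 : sum_of_digits 1 ∈ R.keys := by
      rw [hkeys, PySem.Set.mem_ofList]
      exact List.mem_map.mpr ⟨1, h1, rfl⟩
    intro hc
    rw [hLA, hvals] at hc
    rcases List.map_eq_nil_iff.mp (List.map_eq_nil_iff.mp hc) with hk
    rw [hk] at h2
    exact List.not_mem_nil h2
  have htFne : tableF ≠ [] := by
    intro hc
    rw [← List.length_eq_zero_iff] at hc
    omega
  obtain ⟨ma, hma⟩ := Option.ne_none_iff_exists'.mp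
    (fun hc => hLAne ((PySem.List.max?_eq_none_iff LA (fun x : Int => x)).mp hc))
  obtain ⟨mb, hmb⟩ := Option.ne_none_iff_exists'.mp
    (fun hc => htFne ((PySem.List.max?_eq_none_iff tableF (fun x : Int => x)).mp hc))
  have hmaA : PySem.List.max? LA (fun x => x) = some ma := hma
  have hmbB : PySem.List.max? tableF (fun x => x) = some mb := hmb
  -- ma is an entry of B's table; mb bounds it
  have hmale : ma ≤ mb := by
    have hmem := PySem.List.max?_mem hmaA
    rw [hLA, hvals, List.map_map] at hmem
    obtain ⟨s, hsk, hval⟩ := List.mem_map.mp hmem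
    have hsl : s ∈ l.map sum_of_digits := by
      rw [hkeys, PySem.Set.mem_ofList] at hsk
      exact hsk
    obtain ⟨hs0, hsW, hscast⟩ := hmemBound s hsl
    have hEq : tableF.getD s.toNat 0 = ma := by
      rw [htFget s.toNat hsW, hscast, ← hlen2 s]
      simpa using hval
    have : ma ∈ tableF := by
      rw [← hEq, List.getD_eq_getElem _ _ (by omega : s.toNat < tableF.length)]
      exact List.getElem_mem _
    exact PySem.List.max?_isMax hmbB ma this
  have hmble : mb ≤ ma := by
    have hmem := PySem.List.max?_mem hmbB
    obtain ⟨j, hj, hje⟩ := List.mem_iff_getElem.mp hmem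
    have hjW : j < W := by omega
    have hmbval : mb = (cnt2 (j : Int) : Int) := by
      rw [← htFget j hjW, List.getD_eq_getElem _ _ (by omega : j < tableF.length), hje]
    by_cases hz : cnt2 (j : Int) = 0
    · rw [hmbval, hz]
      have hmem' := PySem.List.max?_mem hmaA
      rw [hLA, hvals, List.map_map] at hmem'
      obtain ⟨s, _, hval⟩ := List.mem_map.mp hmem'
      have : ((R.getD s []).length : Int) = ma := by simpa using hval
      simp only [Nat.cast_zero]
      omega
    · have hjk : (j : Int) ∈ R.keys := by
        rw [hkeys, PySem.Set.mem_ofList]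
        exact hcntMem j hz
      have : mb ∈ LA := by
        rw [hLA, hvals, List.map_map]
        refine List.mem_map.mpr ⟨(j : Int), hjk, ?_⟩
        simp only [Function.comp_apply]
        rw [hlen2 ((j : Int)), ← hmbval]
      exact PySem.List.max?_isMax hmaA mb this
  have hab : ma = mb := le_antisymm hmale hmble
  -- assemble
  show (PySem.List.max? (R.values.map (fun g : List Int => (g.length : Int))) (fun x => x)).getD 0
      = (PySem.List.max? (bump (countsAux W (nN : Int)) 0 (-1)) (fun x => x)).getD 0
  rw [← hLA, ← htF, hmaA, hmbB, hab]

-- ===== VERDICT (by name: the statement is the Claim_ definition above) =====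
theorem max_group_length_spec : Claim_equal_max_group_length := by
  intro n _ hpre
  unfold Spec_max_group_length
  exact final_eq n hpre
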